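-- pv_equiv track=rewrite | github.com/CupofJavad/Anti-Language-Encryption-Tool- | LipsumLab/tools/map_guess.py | tokenize_mixed
-- ===== SOURCE A (Python) =====
-- import argparse, os, io, json, time, random, math, unicodedata
--
-- def is_letter(ch: str) -> bool:
--     return unicodedata.category(ch).startswith("L")
--
-- def tokenize_mixed(txt: str):
--     """
--     Return a list of (is_word, text) preserving punctuation/spacing.
--     Words are sequences of letters; everything else is separators.
--     """
--     out, cur, in_word = [], [], False
--     for ch in txt:
--         letter = is_letter(ch)
--         if letter:
--             if not in_word:
--                 if cur:
--                     out.append((False, "".join(cur)))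
--                     cur = []
--                 in_word = True
--             cur.append(ch)
--         else:
--             if in_word:
--                 out.append((True, "".join(cur)))
--                 cur = []
--                 in_word = False
--             cur.append(ch)
--     if cur:
--         out.append((True, "".join(cur)) if in_word else (False, "".join(cur)))
--     return out
-- ===== SOURCE B (Python) =====
-- import unicodedata
--
-- def is_letter(ch: str) -> bool:
--     return unicodedata.category(ch).startswith("L")
--
-- def tokenize_mixed(txt: str):
--     # Extract maximal same-class runs by index scanning and slicing,
--     # instead of a flush-on-transition state machine.
--     out = []
--     i, n = 0, len(txt)
--     while i < n:
--         k = is_letter(txt[i])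
--         j = i + 1
--         while j < n and is_letter(txt[j]) == k:
--             j += 1
--         out.append((k, txt[i:j]))
--         i = j
--     return out
-- ===== Notes on version B (the rewrite author's own statement) =====
-- stated objective: alternative
-- what changed: Replaces the flush-on-transition state machine (out/cur/in_word with trailing flush) by direct maximal-run extraction: scan to the end of each same-class run and slice it out, so no accumulator or flush logic exists.
import Mathlib
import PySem

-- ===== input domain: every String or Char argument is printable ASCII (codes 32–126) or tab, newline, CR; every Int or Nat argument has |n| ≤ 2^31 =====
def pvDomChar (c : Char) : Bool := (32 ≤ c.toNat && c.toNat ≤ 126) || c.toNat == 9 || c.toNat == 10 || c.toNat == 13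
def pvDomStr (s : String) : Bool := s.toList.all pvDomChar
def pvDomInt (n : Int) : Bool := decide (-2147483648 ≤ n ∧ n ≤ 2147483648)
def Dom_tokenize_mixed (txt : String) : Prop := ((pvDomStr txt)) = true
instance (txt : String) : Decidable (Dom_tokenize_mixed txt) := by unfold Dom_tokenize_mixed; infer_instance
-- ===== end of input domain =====

-- B replaces A's flush-on-transition state machine by direct maximal-run extraction (alternative decomposition, same cost).

-- ===== PORT A =====
-- is_letter: on the stated domain (printable ASCII + tab/newline/CR) the Unicode
-- category starts with "L" exactly for A-Z and a-z; exact there.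
def pvIsLetter (ch : Char) : Bool :=
  ('A' ≤ ch && ch ≤ 'Z') || ('a' ≤ ch && ch ≤ 'z')

-- one iteration of A's for-loop over state (out, cur, in_word)
def pvStepA (st : List (Bool × String) × List Char × Bool) (ch : Char) :
    List (Bool × String) × List Char × Bool :=
  let (out, cur, inWord) := st
  if pvIsLetter ch then
    if !inWord then
      if cur ≠ [] then (out ++ [(false, String.ofList cur)], [ch], true)
      else (out, [ch], true)
    else (out, cur ++ [ch], true)
  else
    if inWord then (out ++ [(true, String.ofList cur)], [ch], false)
    else (out, cur ++ [ch], false)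

def tokenize_mixed (txt : String) : List (Bool × String) :=
  let s := txt.toList.foldl pvStepA ([], [], false)
  if s.2.1 ≠ [] then s.1 ++ [(s.2.2, String.ofList s.2.1)] else s.1

-- ===== PORT B =====
-- B: take the maximal run of characters with the same letter-class as the head,
-- emit it, and recurse on the rest (the index/slice scan of Source B).
def pvChunks : List Char → List (Bool × String)
  | [] => []
  | c :: rest =>
    let k := pvIsLetter c
    (k, String.ofList (c :: rest.takeWhile (fun d => pvIsLetter d == k))) ::
      pvChunks (rest.dropWhile (fun d => pvIsLetter d == k))
termination_by cs => cs.length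
decreasing_by
  simpa using Nat.lt_succ_of_le (List.length_dropWhile_le _ rest)

def tokenize_mixed_alt (txt : String) : List (Bool × String) := pvChunks txt.toList

-- ===== PRECONDITION & SPEC =====
def Spec_tokenize_mixed (txt : String) (out : List (Bool × String)) : Prop := out = tokenize_mixed_alt txt
instance (txt : String) (out : List (Bool × String)) : Decidable (Spec_tokenize_mixed txt out) := by unfold Spec_tokenize_mixed; infer_instance

-- ===== CLAIM (what is proved, stated in full; the proofs are below) =====
def Claim_equal_tokenize_mixed : Prop := ∀ (txt : String), Dom_tokenize_mixed txt → Spec_tokenize_mixed txt (tokenize_mixed txt)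

-- ===== LEMMAS AND PROOFS =====

theorem pvChunks_nil : pvChunks [] = [] := by rw [pvChunks]

theorem pvChunks_cons (c : Char) (rest : List Char) :
    pvChunks (c :: rest) =
      (pvIsLetter c, String.ofList (c :: rest.takeWhile (fun d => pvIsLetter d == pvIsLetter c))) ::
        pvChunks (rest.dropWhile (fun d => pvIsLetter d == pvIsLetter c)) := by
  rw [pvChunks]

-- A's trailing flush, as a function of the final loop state.
def pvFinishA (s : List (Bool × String) × List Char × Bool) : List (Bool × String) :=
  if s.2.1 ≠ [] then s.1 ++ [(s.2.2, String.ofList s.2.1)] else s.1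

-- Invariant: from a mid-run state (out, cur, k) with cur ≠ [], A finishes the
-- current run (cur plus the matching prefix of cs) and then behaves like pvChunks.
theorem pvRun (cs : List Char) : ∀ (out : List (Bool × String)) (cur : List Char) (k : Bool),
    cur ≠ [] →
    pvFinishA (cs.foldl pvStepA (out, cur, k)) =
      out ++ (k, String.ofList (cur ++ cs.takeWhile (fun d => pvIsLetter d == k))) ::
        pvChunks (cs.dropWhile (fun d => pvIsLetter d == k)) := by
  induction cs with
  | nil =>
    intro out cur k hcur
    simp [pvFinishA, hcur, pvChunks_nil]
  | cons d rest ih =>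
    intro out cur k hcur
    by_cases hd : pvIsLetter d = k
    · have hstep : pvStepA (out, cur, k) d = (out, cur ++ [d], k) := by
        cases k <;> simp [pvStepA, hd]
      rw [List.foldl_cons, hstep, ih _ _ _ (by simp)]
      simp [hd]
    · have hd' : pvIsLetter d = !k := by
        cases hk : pvIsLetter d <;> cases k <;> simp_all
      have hstep : pvStepA (out, cur, k) d = (out ++ [(k, String.ofList cur)], [d], !k) := by
        cases k <;> simp [pvStepA, hd', hcur]
      rw [List.foldl_cons, hstep, ih _ _ _ (by simp)]
      have he : (pvIsLetter d == k) = false := by simp [hd]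
      simp only [List.takeWhile_cons, List.dropWhile_cons, he, Bool.false_eq_true,
        if_false]
      rw [pvChunks_cons, hd']
      simp

-- ===== VERDICT (by name: the statement is the Claim_ definition above) =====
theorem tokenize_mixed_spec : Claim_equal_tokenize_mixed := by
  intro txt _
  unfold Spec_tokenize_mixed tokenize_mixed tokenize_mixed_alt
  cases hcs : txt.toList with
  | nil => simp [pvChunks_nil]
  | cons c rest =>
    have hstep : pvStepA ([], [], false) c = ([], [c], pvIsLetter c) := by
      cases h : pvIsLetter c <;> simp [pvStepA, h]
    have := pvRun rest [] [c] (pvIsLetter c) (by simp)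
    rw [List.foldl_cons, hstep]
    show pvFinishA (rest.foldl pvStepA ([], [c], pvIsLetter c)) = pvChunks (c :: rest)
    rw [this, pvChunks_cons]
    simp
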